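-- pv_equiv track=rewrite | github.com/MPolyakman/EGE | 17/6893.py | yslovie
-- ===== SOURCE A (Python) =====
-- def yslovie(troika):
--     for n in troika:
--         if '3' not in str(n):
--             return False
--     for delitel in range(2,sum(troika)):
--         if sum(troika) % delitel == 0:
--             return False
--     return True
-- ===== SOURCE B (Python) =====
-- def yslovie(troika):
--     # same result as A: every number's decimal form contains '3' and the sum
--     # has no divisor d with 2 <= d < sum; B checks divisors only up to sqrt(sum)
--     # and computes the sum once.
--     if any('3' not in str(n) for n in troika):
--         return False
--     s = sum(troika)
--     if s < 2:
--         return True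
--     d = 2
--     while d * d <= s:
--         if s % d == 0:
--             return False
--         d += 1
--     return True
-- ===== Notes on version B (the rewrite author's own statement) =====
-- stated objective: alternative
-- what changed: B tests divisors of the sum only up to its square root (while d*d<=s) and computes the sum once, instead of A's scan of every d in range(2,sum) with sum(troika) re-evaluated each iteration.
import Mathlib
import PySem

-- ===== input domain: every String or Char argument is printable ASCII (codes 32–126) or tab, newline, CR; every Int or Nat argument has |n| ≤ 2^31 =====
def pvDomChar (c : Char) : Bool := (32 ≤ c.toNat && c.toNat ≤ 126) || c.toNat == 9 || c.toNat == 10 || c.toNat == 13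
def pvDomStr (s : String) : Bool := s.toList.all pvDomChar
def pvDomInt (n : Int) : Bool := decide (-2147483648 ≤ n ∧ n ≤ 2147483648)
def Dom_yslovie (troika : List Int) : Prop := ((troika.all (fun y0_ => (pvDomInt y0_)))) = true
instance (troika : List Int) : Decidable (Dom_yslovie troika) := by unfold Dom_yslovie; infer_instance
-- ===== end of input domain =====

-- B: trial division only up to sqrt(sum), sum computed once (A scans all of range(2,sum), recomputing the sum each iteration).

-- ===== PORT A =====
-- first loop: return False as soon as some n has no '3' in str(n)
def yslovieDigitsA : List Int → Bool
  | [] => true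
  | n :: rest => if PySem.Str.isIn "3" (PySem.Int.toStr n) then yslovieDigitsA rest else false

-- second loop over range(2, sum(troika)); body recomputes sum(troika) like A does
def yslovieLoopA (troika : List Int) : List Int → Bool
  | [] => true
  | d :: ds => if PySem.Int.mod troika.sum d = 0 then false else yslovieLoopA troika ds

def yslovie (troika : List Int) : Bool :=
  if yslovieDigitsA troika then
    yslovieLoopA troika (PySem.List.pyRange 2 troika.sum 1)
  else false

-- ===== PORT B =====
-- termination of the while loop: if d*d ≤ s then d ≤ s
theorem pvSqLe {d s : Int} (h : d * d ≤ s) : d ≤ s := by nlinarith [sq_nonneg (d - 1)]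

-- while d*d <= s: if s % d == 0: return False; d += 1
def yslovieTrialB (s d : Int) : Bool :=
  if h : d * d ≤ s then
    if PySem.Int.mod s d = 0 then false else yslovieTrialB s (d + 1)
  else true
termination_by (s + 1 - d).toNat
decreasing_by have := pvSqLe h; omega

def yslovie_alt (troika : List Int) : Bool :=
  if troika.any (fun n => !(PySem.Str.isIn "3" (PySem.Int.toStr n))) then false
  else
    let s := troika.sum
    if s < 2 then true else yslovieTrialB s 2

-- ===== PRECONDITION & SPEC =====
def Spec_yslovie (troika : List Int) (out : Bool) : Prop := out = yslovie_alt troika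
instance (troika : List Int) (out : Bool) : Decidable (Spec_yslovie troika out) := by unfold Spec_yslovie; infer_instance

-- ===== CLAIM (what is proved, stated in full; the proofs are below) =====
def Claim_equal_yslovie : Prop := ∀ (troika : List Int), Dom_yslovie troika → Spec_yslovie troika (yslovie troika)

-- ===== LEMMAS AND PROOFS =====

theorem digitsA_eq_not_any (troika : List Int) :
    yslovieDigitsA troika = !(troika.any (fun n => !(PySem.Str.isIn "3" (PySem.Int.toStr n)))) := by
  induction troika with
  | nil => rfl
  | cons n rest ih =>
    simp only [yslovieDigitsA, List.any_cons]
    cases h : PySem.Str.isIn "3" (PySem.Int.toStr n)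
    · simp
    · simp [ih]

theorem loopA_eq_true_iff (troika : List Int) (ds : List Int) :
    yslovieLoopA troika ds = true ↔ ∀ d ∈ ds, ¬ d ∣ troika.sum := by
  induction ds with
  | nil => simp [yslovieLoopA]
  | cons d ds ih =>
    simp only [yslovieLoopA, List.mem_cons]
    by_cases h : PySem.Int.mod troika.sum d = 0
    · rw [if_pos h]
      constructor
      · intro hf; simp at hf
      · intro hall
        exact absurd ((PySem.Int.mod_eq_zero_iff_dvd _ _).mp h) (hall d (Or.inl rfl))
    · rw [if_neg h, ih]
      constructor
      · rintro hall e (rfl | he)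
        · exact fun hd' => h ((PySem.Int.mod_eq_zero_iff_dvd _ _).mpr hd')
        · exact hall e he
      · intro hall e he; exact hall e (Or.inr he)

theorem trialB_eq_true_iff (s : Int) (d0 : Int) (hd0 : 0 ≤ d0) :
    yslovieTrialB s d0 = true ↔ ∀ d, d0 ≤ d → d * d ≤ s → ¬ d ∣ s := by
  generalize hm : (s + 1 - d0).toNat = m
  induction m generalizing d0 with
  | zero =>
    rw [yslovieTrialB]
    have hds : ¬ d0 * d0 ≤ s := fun h => by have := pvSqLe h; omega
    rw [dif_neg hds]
    constructor
    · intro _ d hd hdd _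
      have := pvSqLe hdd; omega
    · intro _; rfl
  | succ m ih =>
    rw [yslovieTrialB]
    by_cases hds : d0 * d0 ≤ s
    · have hle := pvSqLe hds
      rw [dif_pos hds]
      by_cases hmod : PySem.Int.mod s d0 = 0
      · rw [if_pos hmod]
        constructor
        · intro hf; simp at hf
        · intro hall
          exact absurd ((PySem.Int.mod_eq_zero_iff_dvd _ _).mp hmod) (hall d0 le_rfl hds)
      · rw [if_neg hmod, ih (d0 + 1) (by omega) (by omega)]
        constructor
        · intro hall d hd hdd
          rcases eq_or_lt_of_le hd with rfl | hlt
          · exact fun hdvd => hmod ((PySem.Int.mod_eq_zero_iff_dvd _ _).mpr hdvd)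
          · exact hall d (by omega) hdd
        · intro hall d hd hdd; exact hall d (by omega) hdd
    · rw [dif_neg hds]
      constructor
      · intro _ d hd hdd
        have hmono : d0 * d0 ≤ d * d := mul_le_mul hd hd hd0 (by omega)
        omega
      · intro _; rfl

-- the mathematical core: a divisor in [2, s) exists iff one with d*d ≤ s exists
theorem range_iff_sqrt (s : Int) (hs : ¬ s < 2) :
    (∀ d ∈ PySem.List.pyRange 2 s 1, ¬ d ∣ s) ↔ (∀ d, 2 ≤ d → d * d ≤ s → ¬ d ∣ s) := by
  constructor
  · intro hall d hd hdd hdvd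
    exact hall d (PySem.List.mem_pyRange_one.mpr ⟨hd, by nlinarith⟩) hdvd
  · intro hall d hmem hdvd
    rcases PySem.List.mem_pyRange_one.mp hmem with ⟨hd2, hds⟩
    set e := s / d with he
    have hdpos : (0:Int) < d := by omega
    have hse : d * e = s := Int.mul_ediv_cancel' hdvd
    have hepos : 1 ≤ e := by
      by_contra h
      have : e ≤ 0 := by omega
      nlinarith
    have hene : e ≠ 1 := by
      intro h1; rw [h1, mul_one] at hse; omega
    have he2 : 2 ≤ e := by omega
    have hedvd : e ∣ s := ⟨d, by linarith [hse, mul_comm d e]⟩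
    by_cases hcase : d * d ≤ s
    · exact hall d hd2 hcase hdvd
    · have hed : e < d := by nlinarith
      have : e * e ≤ s := by nlinarith
      exact hall e he2 this hedvd

-- ===== VERDICT (by name: the statement is the Claim_ definition above) =====
theorem yslovie_spec : Claim_equal_yslovie := by
  intro troika _
  unfold Spec_yslovie yslovie yslovie_alt
  rw [digitsA_eq_not_any]
  cases hd : troika.any (fun n => !(PySem.Str.isIn "3" (PySem.Int.toStr n))) with
  | true => rfl
  | false =>
    show yslovieLoopA troika (PySem.List.pyRange 2 troika.sum 1) =
      (if troika.sum < 2 then true else yslovieTrialB troika.sum 2)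
    by_cases hs : troika.sum < 2
    · have hemp : PySem.List.pyRange 2 troika.sum 1 = [] := by
        rw [PySem.List.pyRange_one]
        have h0 : (troika.sum - 2).toNat = 0 := by omega
        simp [h0]
      rw [hemp, if_pos hs]
      rfl
    · rw [if_neg hs]
      have h1 := loopA_eq_true_iff troika (PySem.List.pyRange 2 troika.sum 1)
      have h2 := trialB_eq_true_iff troika.sum 2 (by norm_num)
      have h3 := range_iff_sqrt troika.sum hs
      cases hA : yslovieLoopA troika (PySem.List.pyRange 2 troika.sum 1) with
      | true =>
        rw [hA] at h1
        exact (h2.mpr (h3.mp (h1.mp rfl))).symm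
      | false =>
        rw [hA] at h1
        have hB : yslovieTrialB troika.sum 2 = false := by
          cases hB : yslovieTrialB troika.sum 2 with
          | false => rfl
          | true =>
            exact absurd (h1.mpr (h3.mpr (h2.mp hB))) (by simp)
        rw [hB]
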